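-- pv_equiv track=rewrite | github.com/karlona/Droan | preliminary_sizing.py | calculate_squared_errors
-- ===== SOURCE A (Python) =====
-- def calculate_squared_errors(populated_errors):
--     not_summed = []
--     [not_summed.append([1, error[2] ** 2, 2 * error[1] * error[2], 2 * error[0] * error[1],
--                         2 * error[0] * error[2], error[0] ** 2]) for error in populated_errors]
--     squared_errors = []
--     for i in range(6):
--         summation = 0
--         for j in range(len(not_summed)):
--             summation += not_summed[j][i]
--         squared_errors.append(summation)
--     return squared_errors
-- ===== SOURCE B (Python) =====
-- def calculate_squared_errors(populated_errors):
--     s0 = s1 = s2 = s3 = s4 = s5 = 0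
--     for error in populated_errors:
--         s0 += 1
--         s1 += error[2] ** 2
--         s2 += 2 * error[1] * error[2]
--         s3 += 2 * error[0] * error[1]
--         s4 += 2 * error[0] * error[2]
--         s5 += error[0] ** 2
--     return [s0, s1, s2, s3, s4, s5]
-- ===== Notes on version B (the rewrite author's own statement) =====
-- stated objective: simpler
-- what changed: Drops the intermediate not_summed matrix and the six separate column-summing passes; keeps six running totals updated in one pass over populated_errors.
import Mathlib
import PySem

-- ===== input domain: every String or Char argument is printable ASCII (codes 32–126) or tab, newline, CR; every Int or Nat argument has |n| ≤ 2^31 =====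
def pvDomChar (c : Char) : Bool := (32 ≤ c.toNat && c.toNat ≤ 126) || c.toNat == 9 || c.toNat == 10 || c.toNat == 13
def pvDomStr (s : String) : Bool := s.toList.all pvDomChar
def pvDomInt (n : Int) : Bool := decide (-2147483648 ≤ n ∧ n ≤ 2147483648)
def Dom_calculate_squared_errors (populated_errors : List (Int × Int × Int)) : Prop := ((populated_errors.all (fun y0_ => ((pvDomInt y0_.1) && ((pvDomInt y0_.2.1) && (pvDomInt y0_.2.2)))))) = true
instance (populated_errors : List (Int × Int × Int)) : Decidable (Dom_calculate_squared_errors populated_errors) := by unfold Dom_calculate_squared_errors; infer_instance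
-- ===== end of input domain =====

-- B replaces A's intermediate 6-column table and six column-summing passes by six running totals in one pass (same values, same order).
-- ===== PORT A =====
def pvRowA (error : Int × Int × Int) : List Int :=
  [1, error.2.2 ^ 2, 2 * error.2.1 * error.2.2, 2 * error.1 * error.2.1,
   2 * error.1 * error.2.2, error.1 ^ 2]

def calculate_squared_errors (populated_errors : List (Int × Int × Int)) : List Int :=
  -- not_summed = [...] built by the comprehension
  let not_summed := populated_errors.map pvRowA
  -- for i in range(6): summation over j in range(len(not_summed)) of not_summed[j][i]
  (PySem.List.pyRange 0 6 1).foldl (fun squared_errors i =>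
    squared_errors ++
      [(PySem.List.pyRange 0 (PySem.List.len not_summed) 1).foldl
        (fun summation j => summation + PySem.List.pyGetD (PySem.List.pyGetD not_summed j []) i 0) 0]) []

-- ===== PORT B =====
def calculate_squared_errors_alt (populated_errors : List (Int × Int × Int)) : List Int :=
  let s := populated_errors.foldl
    (fun (a : Int × Int × Int × Int × Int × Int) error =>
      (a.1 + 1, a.2.1 + error.2.2 ^ 2, a.2.2.1 + 2 * error.2.1 * error.2.2,
       a.2.2.2.1 + 2 * error.1 * error.2.1, a.2.2.2.2.1 + 2 * error.1 * error.2.2,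
       a.2.2.2.2.2 + error.1 ^ 2))
    (0, 0, 0, 0, 0, 0)
  [s.1, s.2.1, s.2.2.1, s.2.2.2.1, s.2.2.2.2.1, s.2.2.2.2.2]

-- ===== PRECONDITION & SPEC =====
def Spec_calculate_squared_errors (populated_errors : List (Int × Int × Int)) (out : List Int) : Prop := out = calculate_squared_errors_alt populated_errors
instance (populated_errors : List (Int × Int × Int)) (out : List Int) : Decidable (Spec_calculate_squared_errors populated_errors out) := by unfold Spec_calculate_squared_errors; infer_instance

-- ===== CLAIM (what is proved, stated in full; the proofs are below) =====
def Claim_equal_calculate_squared_errors : Prop := ∀ (populated_errors : List (Int × Int × Int)), Dom_calculate_squared_errors populated_errors → Spec_calculate_squared_errors populated_errors (calculate_squared_errors populated_errors)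

-- ===== LEMMAS AND PROOFS =====

-- A's inner loop (sum of column i over the row table) as a direct fold over the rows
lemma colA_eq (xs : List (Int × Int × Int)) (i : Int) :
    (PySem.List.pyRange 0 (PySem.List.len (xs.map pvRowA)) 1).foldl
        (fun summation j => summation + PySem.List.pyGetD (PySem.List.pyGetD (xs.map pvRowA) j []) i 0) 0
      = (xs.map pvRowA).foldl (fun summation row => summation + PySem.List.pyGetD row i 0) 0 := by
  rw [PySem.List.foldl_pyRange_pyGetD (xs := xs.map pvRowA)
        (f := fun summation row => summation + PySem.List.pyGetD row i 0)]
  · simp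
  · exact le_refl 0

lemma foldB_eq (xs : List (Int × Int × Int)) (a : Int × Int × Int × Int × Int × Int) :
    xs.foldl
      (fun (a : Int × Int × Int × Int × Int × Int) error =>
        (a.1 + 1, a.2.1 + error.2.2 ^ 2, a.2.2.1 + 2 * error.2.1 * error.2.2,
         a.2.2.2.1 + 2 * error.1 * error.2.1, a.2.2.2.2.1 + 2 * error.1 * error.2.2,
         a.2.2.2.2.2 + error.1 ^ 2)) a
    = ((xs.map pvRowA).foldl (fun s row => s + PySem.List.pyGetD row 0 0) a.1,
       (xs.map pvRowA).foldl (fun s row => s + PySem.List.pyGetD row 1 0) a.2.1,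
       (xs.map pvRowA).foldl (fun s row => s + PySem.List.pyGetD row 2 0) a.2.2.1,
       (xs.map pvRowA).foldl (fun s row => s + PySem.List.pyGetD row 3 0) a.2.2.2.1,
       (xs.map pvRowA).foldl (fun s row => s + PySem.List.pyGetD row 4 0) a.2.2.2.2.1,
       (xs.map pvRowA).foldl (fun s row => s + PySem.List.pyGetD row 5 0) a.2.2.2.2.2) := by
  induction xs generalizing a with
  | nil => rfl
  | cons e t ih =>
    simp only [List.map_cons, List.foldl_cons, ih]
    rfl

-- ===== VERDICT (by name: the statement is the Claim_ definition above) =====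
theorem calculate_squared_errors_spec : Claim_equal_calculate_squared_errors := by
  intro xs _
  unfold Spec_calculate_squared_errors calculate_squared_errors calculate_squared_errors_alt
  simp only [foldB_eq]
  have h6 : PySem.List.pyRange 0 6 1 = [0, 1, 2, 3, 4, 5] := by decide
  rw [h6]
  simp only [List.foldl_cons, List.foldl_nil, List.nil_append, List.cons_append,
    colA_eq]
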